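-- pv_equiv track=rewrite | github.com/byangelina/P.O.O_Python | Clase 5/Ejercicio4.py | cantidadPrimos
-- ===== SOURCE A (Python) =====
-- def esPrimo(n):
--     contarDivisores = 0
--     for x in range(1, n + 1, 1):
--         if n % x == 0:
--             contarDivisores = contarDivisores + 1
--
--     if contarDivisores == 2:
--         return True
--     else:
--         return False
--
-- def cantidadPrimos(c):
--     contador = 0
--     numero = 1
--     string = ""
--
--     while contador < c:
--         if esPrimo(numero):
--             string += str(numero) + " "
--             contador += 1
--         numero += 1
--     return string
-- ===== SOURCE B (Python) =====
-- def cantidadPrimos(c):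
--     primes = []
--     n = 2
--     while len(primes) < c:
--         if all(n % p != 0 for p in primes if p * p <= n):
--             primes.append(n)
--         n += 1
--     return "".join(str(p) + " " for p in primes)
-- ===== Notes on version B (the rewrite author's own statement) =====
-- stated objective: faster
-- what changed: A tests each candidate by counting all its divisors with a full 1..n scan and concatenates into the string as it goes; B maintains the list of primes found so far, accepts a candidate iff no stored prime p with p*p <= n divides it, and joins the list into the string at the end.
import Mathlib
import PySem

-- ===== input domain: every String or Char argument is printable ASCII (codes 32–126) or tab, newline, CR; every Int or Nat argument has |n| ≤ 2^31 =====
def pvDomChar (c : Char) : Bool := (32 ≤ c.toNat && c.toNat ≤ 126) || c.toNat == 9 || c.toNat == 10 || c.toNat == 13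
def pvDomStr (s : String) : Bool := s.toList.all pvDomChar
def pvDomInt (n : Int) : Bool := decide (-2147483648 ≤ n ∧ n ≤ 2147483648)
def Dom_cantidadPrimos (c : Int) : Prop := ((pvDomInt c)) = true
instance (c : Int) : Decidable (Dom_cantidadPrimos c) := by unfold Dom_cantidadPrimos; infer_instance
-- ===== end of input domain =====

-- B replaces A's per-candidate full divisor count (a 1..n scan) by trial division against the
-- primes already found with p*p <= n, and joins the string at the end: objective = faster.

-- ===== PORT A =====

-- Termination infrastructure for the unbounded prime searches (cited by the ports' decreasing_by):
-- nextP n = the least prime ≥ n.toNat.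
def nextP (n : Int) : Nat := Nat.find (Nat.exists_infinite_primes n.toNat)

lemma nextP_step {n : Int} (h : ¬ n.toNat.Prime) :
    nextP (n + 1) = nextP n ∧ n < (nextP n : Int) := by
  have hle : n.toNat ≤ nextP n := (Nat.find_spec (Nat.exists_infinite_primes n.toNat)).1
  have hpr : (nextP n).Prime := (Nat.find_spec (Nat.exists_infinite_primes n.toNat)).2
  have hlt : n < (nextP n : Int) := by
    by_cases hn : n ≤ 0
    · have h2 : 2 ≤ nextP n := hpr.two_le
      omega
    · have : n.toNat ≠ nextP n := fun he => h (he ▸ hpr)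
      omega
  refine ⟨?_, hlt⟩
  rw [show nextP (n + 1) = Nat.find (Nat.exists_infinite_primes (n+1).toNat) from rfl,
      Nat.find_eq_iff]
  refine ⟨⟨by omega, hpr⟩, ?_⟩
  intro k hk ⟨hk1, hk2⟩
  exact Nat.find_min (Nat.exists_infinite_primes n.toNat) hk ⟨by omega, hk2⟩

lemma pvLexL {a b x y : Nat} (h : a < b) :
    Prod.Lex (· < ·) (· < ·) (a, x) (b, y) := Prod.Lex.left _ _ h

lemma pvLexR {a x y : Nat} (h : x < y) :
    Prod.Lex (· < ·) (· < ·) (a, x) (a, y) := Prod.Lex.right _ h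

lemma count_dec {c contador : Int} (hc : contador < c) :
    (c - (contador + 1)).toNat < (c - contador).toNat := by omega

lemma gap_dec {n : Int} (h : ¬ n.toNat.Prime) :
    ((nextP (n + 1) : Int) - (n + 1)).toNat < ((nextP n : Int) - n).toNat := by
  obtain ⟨he, hl⟩ := nextP_step h
  rw [he]
  omega

def esPrimo (n : Int) : Bool :=
  let contarDivisores : Int :=
    (PySem.List.pyRange 1 (n + 1) 1).foldl
      (fun acc x => if PySem.Int.mod n x == 0 then acc + 1 else acc) 0
  contarDivisores == 2

-- esPrimo counts the divisors of n in [1, n]; it answers true exactly on the primes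
-- (cited by the loop's decreasing_by, hence stated above the port).
lemma card_divisors_eq_two_iff {m : Nat} (hm : 1 ≤ m) :
    m.divisors.card = 2 ↔ m.Prime := by
  constructor
  · intro h
    have hm2 : 2 ≤ m := by
      by_contra h2
      have hm1 : m = 1 := by omega
      subst hm1
      rw [Nat.divisors_one] at h
      simp at h
    have hsub : ({1, m} : Finset ℕ) ⊆ m.divisors := by
      intro d hd
      rcases Finset.mem_insert.1 hd with rfl | hd
      · exact Nat.mem_divisors.2 ⟨one_dvd m, by omega⟩
      · rw [Finset.mem_singleton] at hd
        rw [hd]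
        exact Nat.mem_divisors.2 ⟨dvd_refl m, by omega⟩
    have hpair : ({1, m} : Finset ℕ).card = 2 := Finset.card_pair (by omega)
    have heq : m.divisors = {1, m} :=
      (Finset.eq_of_subset_of_card_le hsub (by omega)).symm
    rw [Nat.prime_def]
    refine ⟨hm2, fun d hd => ?_⟩
    have : d ∈ m.divisors := Nat.mem_divisors.2 ⟨hd, by omega⟩
    rw [heq] at this
    simpa using this
  · intro hp
    rw [hp.divisors]
    exact Finset.card_pair (by have := hp.two_le; omega)

lemma countP_range_divisors (m : Nat) (hm : 1 ≤ m) :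
    (List.range m).countP (fun k => decide ((k + 1) ∣ m)) = m.divisors.card := by
  rw [List.countP_eq_length_filter]
  show ((Finset.range m).filter (fun k => (k + 1) ∣ m)).card = _
  have himg : Finset.image (fun k => k + 1) ((Finset.range m).filter (fun k => (k + 1) ∣ m))
      = m.divisors := by
    ext d
    simp only [Finset.mem_image, Finset.mem_filter, Finset.mem_range, Nat.mem_divisors]
    constructor
    · rintro ⟨k, ⟨hk, hd⟩, rfl⟩
      exact ⟨hd, by omega⟩
    · rintro ⟨hd, hm0⟩
      have h1 : 1 ≤ d := Nat.pos_of_dvd_of_pos hd (by omega)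
      have h2 : d ≤ m := Nat.le_of_dvd (by omega) hd
      exact ⟨d - 1, ⟨by omega, by rwa [Nat.sub_add_cancel h1]⟩, by omega⟩
  rw [← himg, Finset.card_image_of_injective _ (fun a b h => by omega)]

lemma esPrimo_eq (n : Int) : esPrimo n = decide (n.toNat.Prime) := by
  unfold esPrimo
  by_cases hn : n ≤ 0
  · rw [PySem.List.pyRange_one_eq_nil (by omega)]
    have h0 : n.toNat = 0 := by omega
    simp [h0, Nat.not_prime_zero]
  · have hm : n = (n.toNat : Int) := by omega
    rw [PySem.List.foldl_if_add_one, PySem.List.pyRange_one, List.countP_map]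
    have hsimp : (n + 1 - 1).toNat = n.toNat := by omega
    rw [hsimp]
    have hcongr : (List.range n.toNat).countP
          ((fun x => PySem.Int.mod n x == 0) ∘ fun k => (1 : Int) + ↑k)
        = (List.range n.toNat).countP (fun k => decide ((k + 1) ∣ n.toNat)) := by
      refine List.countP_congr (fun k _ => ?_)
      simp only [Function.comp_apply, beq_iff_eq, decide_eq_true_eq,
        PySem.Int.mod_eq_zero_iff_dvd]
      rw [hm, show (1 + (k : Int)) = ((k + 1 : Nat) : Int) by push_cast; ring,
        Int.natCast_dvd_natCast, Int.toNat_natCast]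
    rw [hcongr, countP_range_divisors n.toNat (by omega)]
    rcases (card_divisors_eq_two_iff (m := n.toNat) (by omega)) with ⟨h1, h2⟩
    by_cases hp : n.toNat.Prime
    · simp [hp, h2 hp]
    · have hne : n.toNat.divisors.card ≠ 2 := fun hc => hp (h1 hc)
      simp only [zero_add, hp, decide_false]
      rw [beq_eq_false_iff_ne]
      exact_mod_cast hne

lemma not_prime_of_esPrimo_false {numero : Int} (hp : ¬ esPrimo numero = true) :
    ¬ numero.toNat.Prime := by
  intro hpr
  rw [esPrimo_eq] at hp
  simp [hpr] at hp

def cantidadPrimosLoop (c contador numero : Int) (string : String) : String :=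
  if hc : contador < c then
    if hp : esPrimo numero then
      cantidadPrimosLoop c (contador + 1) (numero + 1) (string ++ (PySem.Int.toStr numero ++ " "))
    else
      cantidadPrimosLoop c contador (numero + 1) string
  else string
termination_by ((c - contador).toNat, ((nextP numero : Int) - numero).toNat)
decreasing_by
  · exact pvLexL (count_dec hc)
  · exact pvLexR (gap_dec (not_prime_of_esPrimo_false hp))

def cantidadPrimos (c : Int) : String :=
  cantidadPrimosLoop c 0 1 ""

-- ===== PORT B =====

-- all(n % p != 0 for p in primes if p * p <= n)
def cantidadPrimosAll (primes : List Int) (n : Int) : Bool :=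
  primes.all (fun p => !(decide (p * p ≤ n)) || !(PySem.Int.mod n p == 0))

-- cited by the B loop's decreasing_by
lemma not_prime_of_all_false {primes : List Int} {n : Int}
    (h1 : ∀ p ∈ primes, 2 ≤ p) (h : cantidadPrimosAll primes n = false) :
    ¬ n.toNat.Prime := by
  unfold cantidadPrimosAll at h
  rw [List.all_eq_false] at h
  obtain ⟨p, hp, hb⟩ := h
  simp only [Bool.not_eq_true, Bool.or_eq_false_iff, Bool.not_eq_false'] at hb
  obtain ⟨hle, hmod⟩ := hb
  have hle' : p * p ≤ n := of_decide_eq_true hle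
  have hdvd : p ∣ n := (PySem.Int.mod_eq_zero_iff_dvd n p).1 (by simpa using hmod)
  have h2p : 2 ≤ p := h1 p hp
  have hn4 : 4 ≤ n := by nlinarith
  have hq : (p.toNat : Int) = p := by omega
  have hm : (n.toNat : Int) = n := by omega
  have hqd : p.toNat ∣ n.toNat := by
    rw [← Int.natCast_dvd_natCast, hq, hm]; exact hdvd
  have hqlt : p.toNat < n.toNat := by nlinarith [hle', h2p]
  intro hpr
  have := hpr.eq_one_or_self_of_dvd p.toNat hqd
  omega

lemma ge2_append {primes : List Int} {n : Int}
    (h1 : ∀ p ∈ primes, 2 ≤ p) (h2 : 2 ≤ n) : ∀ p ∈ primes ++ [n], 2 ≤ p := by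
  intro p hp
  rcases List.mem_append.1 hp with hm | hm
  · exact h1 p hm
  · simp only [List.mem_singleton] at hm; omega

lemma ge2_succ {n : Int} (h2 : 2 ≤ n) : 2 ≤ n + 1 := by omega

lemma ge2_nil : ∀ p ∈ ([] : List Int), 2 ≤ p := by
  intro p hp; simp at hp

lemma count_decB {c : Int} {primes : List Int} {n : Int}
    (hc : (primes.length : Int) < c) :
    (c - ((primes ++ [n]).length : Int)).toNat < (c - (primes.length : Int)).toNat := by
  simp only [List.length_append, List.length_singleton]
  push_cast
  omega

def cantidadPrimosLoopB (c : Int) (primes : List Int) (n : Int)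
    (h1 : ∀ p ∈ primes, 2 ≤ p) (h2 : 2 ≤ n) : List Int :=
  if hc : (primes.length : Int) < c then
    if ha : cantidadPrimosAll primes n then
      cantidadPrimosLoopB c (primes ++ [n]) (n + 1) (ge2_append h1 h2) (ge2_succ h2)
    else
      cantidadPrimosLoopB c primes (n + 1) h1 (ge2_succ h2)
  else primes
termination_by ((c - primes.length).toNat, ((nextP n : Int) - n).toNat)
decreasing_by
  · exact pvLexL (count_decB hc)
  · exact pvLexR (gap_dec (not_prime_of_all_false h1 (by simpa using ha)))

def cantidadPrimos_alt (c : Int) : String :=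
  let primes := cantidadPrimosLoopB c [] 2 ge2_nil (by omega)
  PySem.Str.join "" (primes.map (fun p => PySem.Int.toStr p ++ " "))

-- ===== PRECONDITION & SPEC =====
def Spec_cantidadPrimos (c : Int) (out : String) : Prop := out = cantidadPrimos_alt c
instance (c : Int) (out : String) : Decidable (Spec_cantidadPrimos c out) := by unfold Spec_cantidadPrimos; infer_instance

-- ===== CLAIM (what is proved, stated in full; the proofs are below) =====
def Claim_equal_cantidadPrimos : Prop := ∀ (c : Int), Dom_cantidadPrimos c → Spec_cantidadPrimos c (cantidadPrimos c)

-- ===== LEMMAS AND PROOFS =====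

-- The canonical result: the list of the first k primes starting the scan at n.
def canonList (k : Nat) (n : Int) : List Int :=
  if k = 0 then []
  else if n.toNat.Prime then n :: canonList (k - 1) (n + 1)
  else canonList k (n + 1)
termination_by (k, ((nextP n : Int) - n).toNat)
decreasing_by
  · exact pvLexL (by omega)
  · rename_i h1 h2
    exact pvLexR (gap_dec h2)

def render : List Int → String
  | [] => ""
  | p :: l => PySem.Int.toStr p ++ " " ++ render l

lemma loopA_eq (c : Int) : ∀ contador numero string,
    cantidadPrimosLoop c contador numero string
      = string ++ render (canonList (c - contador).toNat numero) := by
  intro contador numero string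
  fun_induction cantidadPrimosLoop c contador numero string with
  | case1 contador numero string hc hp ih =>
    rw [ih]
    conv_rhs => rw [canonList]
    have hk : ¬ (c - contador).toNat = 0 := by omega
    have hpr : numero.toNat.Prime := by
      rw [esPrimo_eq] at hp; simpa using hp
    rw [if_neg hk, if_pos hpr]
    have hk1 : (c - contador).toNat - 1 = (c - (contador + 1)).toNat := by omega
    rw [hk1]
    simp [render, String.append_assoc]
  | case2 contador numero string hc hp ih =>
    rw [ih]
    conv_rhs => rw [canonList]
    have hk : ¬ (c - contador).toNat = 0 := by omega
    have hnp : ¬ numero.toNat.Prime := by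
      rw [esPrimo_eq] at hp; simpa using hp
    rw [if_neg hk, if_neg hnp]
  | case3 contador numero string hc =>
    conv_rhs => rw [canonList]
    have hk : (c - contador).toNat = 0 := by omega
    rw [if_pos hk]
    simp [render]

def primesBelow (n : Int) : List Int :=
  ((List.range n.toNat).filter (fun i => decide (Nat.Prime i))).map (fun (i : Nat) => (i : Int))

lemma allTest_iff {n : Int} (hn : 2 ≤ n) :
    cantidadPrimosAll (primesBelow n) n = decide (n.toNat.Prime) := by
  by_cases hp : n.toNat.Prime
  · simp only [hp, decide_true]
    unfold cantidadPrimosAll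
    rw [List.all_eq_true]
    intro p hmem
    simp only [primesBelow, List.mem_map, List.mem_filter, List.mem_range,
      decide_eq_true_eq] at hmem
    obtain ⟨i, ⟨hilt, hipr⟩, rfl⟩ := hmem
    by_cases hdv : PySem.Int.mod n (i : Int) = 0
    · exfalso
      have hdi : (i : Int) ∣ n := (PySem.Int.mod_eq_zero_iff_dvd _ _).1 hdv
      have hnn : ((n.toNat : Int)) = n := by omega
      have hdi' : i ∣ n.toNat := by
        rw [← Int.natCast_dvd_natCast, hnn]; exact hdi
      have := hp.eq_one_or_self_of_dvd i hdi'
      have h2i := hipr.two_le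
      omega
    · simp [hdv]
  · simp only [hp, decide_false]
    unfold cantidadPrimosAll
    rw [List.all_eq_false]
    have hm2 : 2 ≤ n.toNat := by omega
    have hq := Nat.minFac_prime (show n.toNat ≠ 1 by omega)
    have hdvd := Nat.minFac_dvd n.toNat
    have hsq : n.toNat.minFac ^ 2 ≤ n.toNat := Nat.minFac_sq_le_self (by omega) hp
    have h2f := hq.two_le
    have hlt : n.toNat.minFac < n.toNat := by nlinarith
    refine ⟨(n.toNat.minFac : Int), ?_, ?_⟩
    · simp only [primesBelow, List.mem_map, List.mem_filter, List.mem_range,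
        decide_eq_true_eq]
      exact ⟨n.toNat.minFac, ⟨hlt, hq⟩, rfl⟩
    · have hnn : ((n.toNat : Int)) = n := by omega
      have h1 : (n.toNat.minFac : Int) * (n.toNat.minFac : Int) ≤ n := by
        rw [← hnn]
        exact_mod_cast (by nlinarith : n.toNat.minFac * n.toNat.minFac ≤ n.toNat)
      have h2 : PySem.Int.mod n (n.toNat.minFac : Int) = 0 := by
        rw [PySem.Int.mod_eq_zero_iff_dvd, ← hnn]
        exact_mod_cast hdvd
      simp [h1, h2]

lemma primesBelow_succ {n : Int} (hn : 0 ≤ n) :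
    primesBelow (n + 1)
      = primesBelow n ++ (if n.toNat.Prime then [n] else []) := by
  have h1 : (n + 1).toNat = n.toNat + 1 := by omega
  by_cases hp : n.toNat.Prime
  · simp only [primesBelow, h1, List.range_succ, List.filter_append, List.map_append, if_pos hp]
    congr 1
    simp [hp]
    omega
  · simp only [primesBelow, h1, List.range_succ, List.filter_append, List.map_append, if_neg hp]
    simp [hp]

lemma loopB_eq (c : Int) : ∀ primes n h1 h2, primes = primesBelow n →
    cantidadPrimosLoopB c primes n h1 h2
      = primes ++ canonList (c - primes.length).toNat n := by
  intro primes n h1 h2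
  fun_induction cantidadPrimosLoopB c primes n h1 h2 with
  | case1 primes n h1 h2 hc ha ih =>
    intro hinv
    have hpr : n.toNat.Prime := by
      rw [hinv] at ha
      rw [allTest_iff h2] at ha
      simpa using ha
    have hinv' : primes ++ [n] = primesBelow (n + 1) := by
      rw [primesBelow_succ (by omega), if_pos hpr, hinv]
    rw [ih hinv']
    conv_rhs => rw [canonList]
    have hk : ¬ (c - primes.length).toNat = 0 := by omega
    rw [if_neg hk, if_pos hpr]
    have hk1 : (c - (primes ++ [n]).length).toNat = (c - primes.length).toNat - 1 := by
      simp only [List.length_append, List.length_singleton]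
      push_cast
      omega
    rw [hk1, List.append_assoc, List.singleton_append]
  | case2 primes n h1 h2 hc ha ih =>
    intro hinv
    have hnp : ¬ n.toNat.Prime := by
      rw [hinv] at ha
      rw [allTest_iff h2] at ha
      simpa using ha
    have hinv' : primes = primesBelow (n + 1) := by
      rw [primesBelow_succ (by omega), if_neg hnp, List.append_nil, hinv]
    rw [ih hinv']
    conv_rhs => rw [canonList]
    have hk : ¬ (c - primes.length).toNat = 0 := by omega
    rw [if_neg hk, if_neg hnp]
  | case3 primes n h1 h2 hc =>
    intro hinv
    conv_rhs => rw [canonList]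
    have hk : (c - primes.length).toNat = 0 := by omega
    rw [if_pos hk, List.append_nil]

-- 1 is not prime, so a scan from 1 and a scan from 2 collect the same primes
lemma canon_one (k : Nat) : canonList k 1 = canonList k 2 := by
  rw [canonList]
  split_ifs with h hp
  · rw [canonList]; simp [h]
  · norm_num at hp
  · rfl

lemma chars_join_nil_cons (a : List Char) (rest : List (List Char)) :
    PySem.Chars.join [] (a :: rest) = a ++ PySem.Chars.join [] rest := by
  cases rest with
  | nil => simp [PySem.Chars.join_singleton]
  | cons b r => rw [PySem.Chars.join_cons_cons]; simp

lemma render_eq_join (l : List Int) :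
    PySem.Str.join "" (l.map (fun p => PySem.Int.toStr p ++ " ")) = render l := by
  rw [← String.toList_inj, PySem.Str.toList_join]
  induction l with
  | nil => simp [show "".toList = ([] : List Char) from rfl, PySem.Chars.join_nil, render]
  | cons p l ih =>
    simp only [List.map_cons, List.map_map]
    rw [show "".toList = ([] : List Char) from rfl, chars_join_nil_cons]
    simp only [render, String.toList_append]
    simp only [List.map_map, show "".toList = ([] : List Char) from rfl] at ih
    rw [ih]

-- ===== VERDICT (by name: the statement is the Claim_ definition above) =====
theorem cantidadPrimos_spec : Claim_equal_cantidadPrimos := by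
  intro c _
  unfold Spec_cantidadPrimos cantidadPrimos cantidadPrimos_alt
  rw [loopA_eq, loopB_eq c [] 2 _ _ (by simp [primesBelow]; decide), render_eq_join]
  simp only [List.length_nil, Nat.cast_zero, sub_zero, List.nil_append]
  rw [canon_one, String.empty_append]
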